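-- pv_equiv track=rewrite | github.com/ShlomoEliyahu/hash_cracker_pentera | master.py | divide_ranges
-- ===== SOURCE A (Python) =====
-- from typing import List, Tuple, Optional
--
-- def divide_ranges(start: int, end: int, parts: int) -> List[Tuple[int, int]]:
--     if parts <= 0:
--         raise ValueError("parts have to be positive number")
--
--     total_numbers = end - start
--     if total_numbers <= 0:
--         raise ValueError("The end of the range cant be smaller than the start of the range")
--
--     step = total_numbers // parts
--     remainder = total_numbers % parts
--
--     ranges = []
--     current_start = start
--
--     for i in range(parts):
--         current_end = current_start + step
--         if remainder > 0:
--             current_end += 1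
--             remainder -= 1
--         ranges.append((current_start, current_end))
--         current_start = current_end
--
--     return ranges
-- ===== SOURCE B (Python) =====
-- def divide_ranges(start: int, end: int, parts: int):
--     if parts <= 0:
--         raise ValueError("parts have to be positive number")
--
--     total_numbers = end - start
--     if total_numbers <= 0:
--         raise ValueError("The end of the range cant be smaller than the start of the range")
--
--     step, remainder = divmod(total_numbers, parts)
--     bounds = [start + k * step + min(k, remainder) for k in range(parts + 1)]
--     return list(zip(bounds, bounds[1:]))
-- ===== Notes on version B (the rewrite author's own statement) =====
-- stated objective: alternative
-- what changed: Replaces the stateful loop (running current_start and a decremented remainder) by a closed-form boundary list bounds[k] = start + k*step + min(k, remainder) zipped with its own tail.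
import Mathlib
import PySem

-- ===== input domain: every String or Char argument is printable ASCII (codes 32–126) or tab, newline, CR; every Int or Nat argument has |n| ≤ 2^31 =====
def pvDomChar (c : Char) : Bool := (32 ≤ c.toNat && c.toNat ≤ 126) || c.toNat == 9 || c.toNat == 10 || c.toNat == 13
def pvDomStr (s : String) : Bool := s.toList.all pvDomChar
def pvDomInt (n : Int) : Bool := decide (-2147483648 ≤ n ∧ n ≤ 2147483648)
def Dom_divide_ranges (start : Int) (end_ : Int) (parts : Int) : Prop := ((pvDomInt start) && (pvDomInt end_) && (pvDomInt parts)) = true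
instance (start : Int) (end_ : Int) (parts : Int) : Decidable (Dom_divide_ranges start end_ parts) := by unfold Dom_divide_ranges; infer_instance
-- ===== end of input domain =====

-- B replaces A's stateful loop by a closed-form boundary list zipped with its tail; equivalent on all inputs where A returns (Pre_: parts > 0 and end_ > start).


-- ===== PORT A =====
-- A's for-loop over range(parts): structural recursion on the remaining iteration count,
-- carrying the same state (current_start, remainder); each step appends (current_start, current_end).
def divideLoopA (step : Int) : Nat → Int → Int → List (Int × Int)
  | 0, _, _ => []
  | n + 1, cs, rem =>
      let ce := if rem > 0 then cs + step + 1 else cs + step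
      let rem' := if rem > 0 then rem - 1 else rem
      (cs, ce) :: divideLoopA step n ce rem'

def divide_ranges (start : Int) (end_ : Int) (parts : Int) : List (Int × Int) :=
  if parts ≤ 0 then []          -- Python: raise ValueError (excluded by Pre_)
  else
    let total := end_ - start
    if total ≤ 0 then []        -- Python: raise ValueError (excluded by Pre_)
    else
      let step := PySem.Int.floordiv total parts
      let rem := PySem.Int.mod total parts
      divideLoopA step parts.toNat start rem

-- ===== PORT B =====
def divide_ranges_alt (start : Int) (end_ : Int) (parts : Int) : List (Int × Int) :=
  if parts ≤ 0 then []          -- Python: raise ValueError (excluded by Pre_)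
  else
    let total := end_ - start
    if total ≤ 0 then []        -- Python: raise ValueError (excluded by Pre_)
    else
      let step := PySem.Int.floordiv total parts
      let rem := PySem.Int.mod total parts
      let bounds := (PySem.List.pyRange 0 (parts + 1) 1).map
        (fun k => start + k * step + min k rem)
      bounds.zip bounds.tail

-- ===== PRECONDITION & SPEC =====
-- Pre_ excludes exactly the inputs where A raises ValueError: nonpositive parts, or end_ - start ≤ 0.
def Pre_divide_ranges (start : Int) (end_ : Int) (parts : Int) : Prop :=
  0 < parts ∧ start < end_
instance (start : Int) (end_ : Int) (parts : Int) : Decidable (Pre_divide_ranges start end_ parts) := by unfold Pre_divide_ranges; infer_instance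

def pvWitness_divide_ranges : Int × Int × Int := (0, 10, 3)

def Spec_divide_ranges (start : Int) (end_ : Int) (parts : Int) (out : List (Int × Int)) : Prop := out = divide_ranges_alt start end_ parts
instance (start : Int) (end_ : Int) (parts : Int) (out : List (Int × Int)) : Decidable (Spec_divide_ranges start end_ parts out) := by unfold Spec_divide_ranges; infer_instance

-- ===== CLAIM (what is proved, stated in full; the proofs are below) =====
def Claim_equal_divide_ranges : Prop := ∀ (start : Int) (end_ : Int) (parts : Int), Dom_divide_ranges start end_ parts → Pre_divide_ranges start end_ parts → Spec_divide_ranges start end_ parts (divide_ranges start end_ parts)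

-- ===== LEMMAS AND PROOFS =====

-- one step of the front-loaded boundary formula
theorem stepmin (cs step rem a : Int) (ha : 0 ≤ a) (hrem : 0 ≤ rem) :
    (if rem > 0 then cs + step + 1 else cs + step) + a * step +
      min a (if rem > 0 then rem - 1 else rem)
    = cs + (a + 1) * step + min (a + 1) rem := by
  have h : (a + 1) * step = a * step + step := by ring
  rw [h]
  generalize a * step = P
  split_ifs with hr <;> omega

-- A's loop produces the closed-form segments: the k-th pair is (b k, b (k+1)) with
-- b x = cs + x*step + min x rem (front-loading one extra unit into the first `rem` segments).
theorem divideLoopA_closed (step : Int) : ∀ (n : Nat) (cs rem : Int), 0 ≤ rem →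
    divideLoopA step n cs rem =
      (List.range n).map (fun (k : Nat) =>
        (cs + (k : Int) * step + min (k : Int) rem,
         cs + ((k : Int) + 1) * step + min ((k : Int) + 1) rem)) := by
  intro n
  induction n with
  | zero => intro cs rem _; simp [divideLoopA]
  | succ m ih =>
    intro cs rem hrem
    have hrem' : (0 : Int) ≤ (if rem > 0 then rem - 1 else rem) := by split <;> omega
    rw [List.range_succ_eq_map]
    simp only [divideLoopA, List.map_cons, List.map_map]
    rw [ih _ _ hrem']
    congr 1
    · -- head pair
      simp only [Nat.cast_zero, Prod.mk.injEq, zero_mul, one_mul, zero_add]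
      constructor
      · omega
      · split <;> omega
    · -- tail: pointwise equality over range m
      apply List.map_congr_left
      intro k _
      have ha : (0 : Int) ≤ (k : Int) := Int.natCast_nonneg k
      simp only [Function.comp, Nat.succ_eq_add_one, Nat.cast_add, Nat.cast_one,
        Prod.mk.injEq]
      exact ⟨stepmin cs step rem (k : Int) ha hrem,
             stepmin cs step rem ((k : Int) + 1) (by omega) hrem⟩

-- zipping a mapped range with its own tail gives the adjacent pairs
theorem zip_tail_map_range {α : Type} (f : Nat → α) : ∀ (n : Nat),
    (((List.range (n + 1)).map f).zip ((List.range (n + 1)).map f).tail) =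
      (List.range n).map (fun k => (f k, f (k + 1))) := by
  intro n
  induction n generalizing f with
  | zero => simp
  | succ m ih =>
    have h := ih (fun k => f (k + 1))
    simp only [List.range_succ_eq_map, List.map_cons, List.map_map, List.tail_cons,
      List.zip_cons_cons, Function.comp_def, Nat.succ_eq_add_one] at h ⊢
    rw [h]

-- ===== VERDICT (by name: the statement is the Claim_ definition above) =====
theorem divide_ranges_spec : Claim_equal_divide_ranges := by
  intro start end_ parts _ hpre
  obtain ⟨hp, hse⟩ := hpre
  unfold Spec_divide_ranges divide_ranges divide_ranges_alt
  have hnp : ¬ parts ≤ 0 := by omega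
  have hnt : ¬ end_ - start ≤ 0 := by omega
  simp only [hnp, hnt, if_false]
  set total := end_ - start with htot
  set step := PySem.Int.floordiv total parts with hstep
  set rem := PySem.Int.mod total parts with hrem
  have hrem0 : 0 ≤ rem := PySem.Int.mod_nonneg total hp
  rw [divideLoopA_closed step parts.toNat start rem hrem0]
  rw [PySem.List.pyRange_one]
  have hb : ((parts + 1 - 0).toNat) = parts.toNat + 1 := by omega
  rw [hb]
  rw [List.map_map]
  simp only [Function.comp_def, zero_add]
  rw [zip_tail_map_range (fun (k : Nat) => start + (k : Int) * step + min (k : Int) rem) parts.toNat]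
  apply List.map_congr_left
  intro k _
  simp only [Prod.mk.injEq]
  constructor
  · trivial
  · push_cast
    rfl
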